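-- pv_equiv track=rewrite | github.com/vanshikascribeemr/Wound-Care | scriberyte/NEW_doctor_patient_conversation_utils_code.py | generate_html_string_updated
-- ===== SOURCE A (Python) =====
-- def generate_html_string_updated(chatgpt_output, category_list):
--     # Normalize category list for matching
--     normalized_category_map = {c.lower().strip(): c for c in category_list}
--     normalized_categories = list(normalized_category_map.keys())
--
--     # Split input into non-empty lines
--     lines = [line.strip() for line in chatgpt_output.split('\n') if line.strip()]
--     section_indices = []
--     section_names = []
--
--     pre_parsed_sections = {}  # Inline key-value headers like "Chief Complaint: value"
--
--     # Identify headers and index positions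
--     for idx, line in enumerate(lines):
--         stripped_line = line.strip()
--         # Inline section: "Chief Complaint: Fever"
--         if ':' in stripped_line:
--             possible_key, possible_value = map(str.strip, stripped_line.split(':', 1))
--             key_norm = possible_key.lower()
--             if key_norm in normalized_categories:
--                 if possible_value:
--                     pre_parsed_sections[normalized_category_map[key_norm]] = [possible_value]
--                 section_indices.append(idx)
--                 section_names.append(normalized_category_map[key_norm])
--         else:
--             key_norm = stripped_line.lower().rstrip(':-')
--             if key_norm in normalized_categories:
--                 section_indices.append(idx)
--                 section_names.append(normalized_category_map[key_norm])
--
--     # Add final boundary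
--     if section_indices:
--         section_indices.append(len(lines))
--
--     section_content_map = {**pre_parsed_sections}
--
--     # Fill section content between headers
--     for i in range(len(section_indices) - 1):
--         section_name = section_names[i]
--         if section_name in pre_parsed_sections:
--             continue
--         start_idx = section_indices[i] + 1
--         end_idx = section_indices[i + 1]
--         content = lines[start_idx:end_idx]
--         section_content_map[section_name] = content
--
--     # Generate HTML
--     html_string = ""
--     for section in category_list:
--         if section not in section_content_map:
--             continue  # Skip if section isn't present in chatgpt_output
--
--         html_string += f"<h2>{section}</h2>\n"
--         for line in section_content_map[section]:
--             if line.endswith(':') or line.endswith('-'):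
--                 html_string += f"<h4>{line}</h4>\n"
--             else:
--                 html_string += f"<p>{line}</p>\n"
--
--
--     sorted_sectionwise_output = [
--         {'category': sec, 'content': " ".join(section_content_map.get(sec, []))}
--         for sec in category_list
--     ]
--
--     return html_string, sorted_sectionwise_output
-- ===== SOURCE B (Python) =====
-- def _header(line, cmap):
--     """Classify a stripped line: return (canonical_name, inline_value_or_None),
--     or None if the line is not a section header."""
--     if ':' in line:
--         key, value = map(str.strip, line.split(':', 1))
--         name = cmap.get(key.lower())
--         if name is None:
--             return None
--         return (name, value if value else None)
--     name = cmap.get(line.lower().rstrip(':-'))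
--     if name is None:
--         return None
--     return (name, None)
--
--
-- def generate_html_string_updated(chatgpt_output, category_list):
--     cmap = {c.lower().strip(): c for c in category_list}
--     lines = [line.strip() for line in chatgpt_output.split('\n') if line.strip()]
--
--     # Single streaming pass: accumulate content under the current open section.
--     content = {}
--     locked = set()   # categories fixed by an inline "Name: value" header
--     current = None   # category currently accumulating, or None
--     for line in lines:
--         h = _header(line, cmap)
--         if h is None:
--             if current is not None:
--                 content[current].append(line)
--         else:
--             name, value = h
--             if value is not None:
--                 content[name] = [value]
--                 locked.add(name)
--                 current = None
--             elif name in locked: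
--                 current = None
--             else:
--                 content[name] = []
--                 current = name
--
--     html_parts = []
--     for section in category_list:
--         if section not in content:
--             continue
--         html_parts.append(f"<h2>{section}</h2>\n")
--         for line in content[section]:
--             if line.endswith(':') or line.endswith('-'):
--                 html_parts.append(f"<h4>{line}</h4>\n")
--             else:
--                 html_parts.append(f"<p>{line}</p>\n")
--
--     sorted_sectionwise_output = [
--         {'category': sec, 'content': " ".join(content.get(sec, []))}
--         for sec in category_list
--     ]
--     return "".join(html_parts), sorted_sectionwise_output
-- ===== Notes on version B (the rewrite author's own statement) =====
-- stated objective: alternative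
-- what changed: Replaces A's three-phase parse (collect header indices/names, append an end boundary, then fill each section by slicing the line list between consecutive header indices, with a separately pre-built inline-value dict) by a single streaming pass over the lines that keeps the currently open section, a lock set for inline-valued sections, and appends content lines directly; the HTML is assembled as a list of fragments joined once instead of repeated string concatenation.
import Mathlib
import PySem

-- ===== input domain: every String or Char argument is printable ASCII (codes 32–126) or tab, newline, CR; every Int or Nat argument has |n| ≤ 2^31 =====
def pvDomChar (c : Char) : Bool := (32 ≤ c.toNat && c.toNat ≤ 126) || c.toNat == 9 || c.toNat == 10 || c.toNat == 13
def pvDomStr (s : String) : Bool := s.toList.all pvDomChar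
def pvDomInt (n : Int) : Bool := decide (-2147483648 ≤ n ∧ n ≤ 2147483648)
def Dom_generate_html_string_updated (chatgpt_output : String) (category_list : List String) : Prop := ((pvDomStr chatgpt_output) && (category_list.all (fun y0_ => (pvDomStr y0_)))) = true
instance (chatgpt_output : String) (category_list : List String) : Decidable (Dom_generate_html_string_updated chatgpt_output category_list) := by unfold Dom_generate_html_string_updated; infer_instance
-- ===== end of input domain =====

-- B replaces A's three-phase parse (header index list, end boundary, slice filling) by a single
-- streaming pass with a current-section accumulator and a lock set; same return value.

-- shared helper: hand port of Python `s.rstrip(':-')` (PySem has no rstrip-with-chars):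
-- drop trailing ':' / '-' characters; exact on all strings.
def pvRstripCD (s : String) : String :=
  String.ofList ((s.toList.reverse.dropWhile (fun c => c == ':' || c == '-')).reverse)

-- shared helper: both Pythons build the same normalized category map
-- {c.lower().strip(): c for c in category_list}
def pvCmap (category_list : List String) : PySem.Dict String String :=
  category_list.foldl (fun d c => d.insert (PySem.Str.strip (PySem.Str.lower c)) c) PySem.Dict.empty

-- shared helper: lines = [line.strip() for line in chatgpt_output.split('\n') if line.strip()]
def pvLines (chatgpt_output : String) : List String :=
  (((PySem.Str.split? chatgpt_output "\n").getD []).map PySem.Str.strip).filter (fun t => !(t == ""))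

-- ===== PORT A =====
-- body of A's `for idx, line in enumerate(lines)` loop over the state
-- (section_indices, section_names, pre_parsed_sections)
def pvA_scanStep (cm : PySem.Dict String String)
    (st : List Int × List String × PySem.Dict String (List String)) (p : Int × String) :
    List Int × List String × PySem.Dict String (List String) :=
  let stripped_line := PySem.Str.strip p.2
  if PySem.Str.isIn ":" stripped_line then
    -- split(':', 1) of a line containing ':' always yields exactly two parts
    let parts := (PySem.Str.splitMax? stripped_line ":" 1).getD []
    let possible_key := PySem.Str.strip (parts.getD 0 "")
    let possible_value := PySem.Str.strip (parts.getD 1 "")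
    let key_norm := PySem.Str.lower possible_key
    if cm.keys.contains key_norm then
      -- KeyError impossible: key_norm is a key of the map (guarded by the membership test)
      let canon := (cm.get? key_norm).getD ""
      let pre' := if !(possible_value == "") then st.2.2.insert canon [possible_value] else st.2.2
      (st.1 ++ [p.1], st.2.1 ++ [canon], pre')
    else st
  else
    let key_norm := pvRstripCD (PySem.Str.lower stripped_line)
    if cm.keys.contains key_norm then
      let canon := (cm.get? key_norm).getD ""
      (st.1 ++ [p.1], st.2.1 ++ [canon], st.2.2)
    else st

-- body of A's `for i in range(len(section_indices) - 1)` fill loop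
def pvA_fillStep (lines : List String) (names : List String) (indices : List Int)
    (pre : PySem.Dict String (List String)) (m : PySem.Dict String (List String)) (i : Int) :
    PySem.Dict String (List String) :=
  let section_name := PySem.List.pyGetD names i ""
  if pre.contains section_name then m
  else
    let start_idx := PySem.List.pyGetD indices i 0 + 1
    let end_idx := PySem.List.pyGetD indices (i + 1) 0
    m.insert section_name (PySem.List.slice lines (some start_idx) (some end_idx))

-- body of A's inner `for line in section_content_map[section]` HTML loop
def pvA_lineStep (h : String) (line : String) : String :=
  if PySem.Str.endswith line ":" || PySem.Str.endswith line "-" then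
    h ++ "<h4>" ++ line ++ "</h4>\n"
  else
    h ++ "<p>" ++ line ++ "</p>\n"

-- body of A's outer `for section in category_list` HTML loop
def pvA_htmlStep (m : PySem.Dict String (List String)) (h : String) (sect : String) : String :=
  if !(m.contains sect) then h
  else (m.getD sect []).foldl pvA_lineStep (h ++ "<h2>" ++ sect ++ "</h2>\n")

def generate_html_string_updated (chatgpt_output : String) (category_list : List String) : String × (List (List (String × String))) :=
  let cm := pvCmap category_list
  let lines := pvLines chatgpt_output
  let scan := (PySem.List.enumerate lines).foldl (pvA_scanStep cm) ([], [], PySem.Dict.empty)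
  -- if section_indices: section_indices.append(len(lines))
  let section_indices := if !(scan.1 == []) then scan.1 ++ [PySem.List.len lines] else scan.1
  -- section_content_map = {**pre_parsed_sections}, then the fill loop
  let m := (PySem.List.pyRange 0 (PySem.List.len section_indices - 1)).foldl
             (pvA_fillStep lines scan.2.1 section_indices scan.2.2) scan.2.2
  (category_list.foldl (pvA_htmlStep m) "",
   category_list.map (fun sec => [("category", sec), ("content", PySem.Str.join " " (m.getD sec []))]))

-- ===== PORT B =====
-- B helper: classify a stripped line; some (name, some v) = inline header with value,
-- some (name, none) = plain header (or inline header with empty value), none = content line.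
def pvHeader (cmap : PySem.Dict String String) (line : String) : Option (String × Option String) :=
  if PySem.Str.isIn ":" line then
    let parts := (PySem.Str.splitMax? line ":" 1).getD []
    let key := PySem.Str.strip (parts.getD 0 "")
    let value := PySem.Str.strip (parts.getD 1 "")
    match cmap.get? (PySem.Str.lower key) with
    | none => none
    | some name => some (name, if !(value == "") then some value else none)
  else
    match cmap.get? (pvRstripCD (PySem.Str.lower line)) with
    | none => none
    | some name => some (name, none)

-- body of B's single streaming loop over (content, locked, current)
def pvB_step (cm : PySem.Dict String String)
    (st : PySem.Dict String (List String) × PySem.Set String × Option String) (line : String) :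
    PySem.Dict String (List String) × PySem.Set String × Option String :=
  match pvHeader cm line with
  | none =>
    match st.2.2 with
    -- content[current].append(line); current is always a key of content here
    | some cur => (st.1.modify cur [] (fun l => l ++ [line]), st.2.1, st.2.2)
    | none => st
  | some (name, some v) => (st.1.insert name [v], PySem.Set.add st.2.1 name, none)
  | some (name, none) =>
    if st.2.1.contains name then (st.1, st.2.1, (none : Option String))
    else (st.1.insert name ([] : List String), st.2.1, some name)

-- body of B's inner HTML loop (collects fragments into html_parts)
def pvB_lineStep (ps : List String) (line : String) : List String :=
  if PySem.Str.endswith line ":" || PySem.Str.endswith line "-" then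
    ps ++ ["<h4>" ++ line ++ "</h4>\n"]
  else
    ps ++ ["<p>" ++ line ++ "</p>\n"]

-- body of B's outer HTML loop
def pvB_partsStep (m : PySem.Dict String (List String)) (ps : List String) (sect : String) : List String :=
  if !(m.contains sect) then ps
  else (m.getD sect []).foldl pvB_lineStep (ps ++ ["<h2>" ++ sect ++ "</h2>\n"])

def generate_html_string_updated_alt (chatgpt_output : String) (category_list : List String) : String × (List (List (String × String))) :=
  let cm := pvCmap category_list
  let lines := pvLines chatgpt_output
  let st := lines.foldl (pvB_step cm) (PySem.Dict.empty, PySem.Set.empty, none)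
  (PySem.Str.join "" (category_list.foldl (pvB_partsStep st.1) []),
   category_list.map (fun sec => [("category", sec), ("content", PySem.Str.join " " (st.1.getD sec []))]))

-- ===== PRECONDITION & SPEC =====
def Spec_generate_html_string_updated (chatgpt_output : String) (category_list : List String) (out : String × (List (List (String × String)))) : Prop := out = generate_html_string_updated_alt chatgpt_output category_list
instance (chatgpt_output : String) (category_list : List String) (out : String × (List (List (String × String)))) : Decidable (Spec_generate_html_string_updated chatgpt_output category_list out) := by unfold Spec_generate_html_string_updated; infer_instance

-- ===== CLAIM (what is proved, stated in full; the proofs are below) =====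
def Claim_equal_generate_html_string_updated : Prop := ∀ (chatgpt_output : String) (category_list : List String), Dom_generate_html_string_updated chatgpt_output category_list → Spec_generate_html_string_updated chatgpt_output category_list (generate_html_string_updated chatgpt_output category_list)

-- ===== LEMMAS AND PROOFS =====

-- ---- ghost data: the header occurrences of the line list, with their positions ----
def pvHdrs (cm : PySem.Dict String String) : List String → Nat → List (Nat × String × Option String)
  | [], _ => []
  | l :: ls, i =>
    match pvHeader cm l with
    | some h => (i, h) :: pvHdrs cm ls (i + 1)
    | none => pvHdrs cm ls (i + 1)

def pvPreStep (d : PySem.Dict String (List String)) (h : Nat × String × Option String) :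
    PySem.Dict String (List String) :=
  match h.2.2 with
  | some v => d.insert h.2.1 [v]
  | none => d

def pvPre (hs : List (Nat × String × Option String)) : PySem.Dict String (List String) :=
  hs.foldl pvPreStep PySem.Dict.empty

def pvInl (c : String) (hs : List (Nat × String × Option String)) : List String :=
  hs.filterMap (fun h => if h.2.1 == c then h.2.2 else none)

def pvNext (L : List String) (rest : List (Nat × String × Option String)) : Nat :=
  match rest.head? with
  | some r => r.1
  | none => L.length

def pvFills (L : List String) : List (Nat × String × Option String) → List (String × List String)
  | [] => []
  | h :: rest =>
    (h.2.1, (L.drop (h.1 + 1)).take (pvNext L rest - (h.1 + 1))) :: pvFills L rest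

def pvFillStep (q : String → Bool) (m : PySem.Dict String (List String)) (p : String × List String) :
    PySem.Dict String (List String) :=
  if q p.1 then m else m.insert p.1 p.2

def pvAppendLast (x : String) : List (String × List String) → List (String × List String)
  | [] => []
  | [p] => [(p.1, p.2 ++ [x])]
  | p :: q :: rest => p :: pvAppendLast x (q :: rest)

def pvAContains (pre : PySem.Dict String (List String)) (names : List String) (c : String) : Bool :=
  pre.contains c || names.contains c

def pvAGetD (pre : PySem.Dict String (List String)) (fills : List (String × List String)) (c : String) :
    List String :=
  if pre.contains c then pre.getD c []
  else
    match (fills.filter (fun p => p.1 == c)).getLast? with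
    | some p => p.2
    | none => []

def pvPiece (line : String) : String :=
  if PySem.Str.endswith line ":" || PySem.Str.endswith line "-" then "<h4>" ++ line ++ "</h4>\n"
  else "<p>" ++ line ++ "</p>\n"

def pvBlock (m : PySem.Dict String (List String)) (sect : String) : List String :=
  if !(m.contains sect) then []
  else ("<h2>" ++ sect ++ "</h2>\n") :: (m.getD sect []).map pvPiece

-- ---- small string facts ----
lemma pv_head?_dropWhile (p : Char → Bool) (l : List Char) (a : Char)
    (h : (l.dropWhile p).head? = some a) : p a = false := by
  induction l with
  | nil => simp at h
  | cons b l ih =>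
    by_cases hb : p b
    · rw [List.dropWhile_cons_of_pos hb] at h; exact ih h
    · rw [List.dropWhile_cons_of_neg hb] at h
      simp at h
      rw [← h]
      simpa using hb

lemma pv_dropWhile_eq_self (p : Char → Bool) (l : List Char)
    (h : ∀ a, l.head? = some a → p a = false) : l.dropWhile p = l := by
  cases l with
  | nil => rfl
  | cons a l => rw [List.dropWhile_cons_of_neg (by simp [h a rfl])]

lemma pv_getLast?_dropWhile (p : Char → Bool) (l : List Char)
    (h : l.dropWhile p ≠ []) : (l.dropWhile p).getLast? = l.getLast? := by
  induction l with
  | nil => simp at h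
  | cons a l ih =>
    by_cases hb : p a
    · rw [List.dropWhile_cons_of_pos hb] at h ⊢
      rw [ih h, List.getLast?_cons]
      have hl : l ≠ [] := by
        intro e; rw [e] at h; simp at h
      cases hg : l.getLast? with
      | none => exact absurd (List.getLast?_eq_none_iff.mp hg) hl
      | some y => simp
    · rw [List.dropWhile_cons_of_neg hb]

lemma pv_strip_list (p : Char → Bool) (cs : List Char) :
    ((((((cs.dropWhile p).reverse.dropWhile p).reverse).dropWhile p).reverse.dropWhile p).reverse)
      = ((cs.dropWhile p).reverse.dropWhile p).reverse := by
  have h1 : (((cs.dropWhile p).reverse.dropWhile p).reverse).dropWhile p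
      = ((cs.dropWhile p).reverse.dropWhile p).reverse := by
    apply pv_dropWhile_eq_self
    intro a ha
    rw [List.head?_reverse] at ha
    have hne : (cs.dropWhile p).reverse.dropWhile p ≠ [] := by
      intro e; rw [e] at ha; simp at ha
    rw [pv_getLast?_dropWhile _ _ hne, List.getLast?_reverse] at ha
    exact pv_head?_dropWhile p cs a ha
  rw [h1]
  have h2 : (((cs.dropWhile p).reverse.dropWhile p).reverse).reverse.dropWhile p
      = (((cs.dropWhile p).reverse.dropWhile p).reverse).reverse := by
    apply pv_dropWhile_eq_self
    intro a ha
    rw [List.reverse_reverse] at ha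
    exact pv_head?_dropWhile p (cs.dropWhile p).reverse a ha
  rw [h2, List.reverse_reverse]

lemma pv_strip_idem (s : String) : PySem.Str.strip (PySem.Str.strip s) = PySem.Str.strip s := by
  apply String.ext
  rw [PySem.Str.toList_strip, PySem.Str.toList_strip]
  show PySem.Chars.strip (PySem.Chars.strip s.toList) = PySem.Chars.strip s.toList
  simp only [PySem.Chars.strip, PySem.Chars.lstrip, PySem.Chars.rstrip]
  exact pv_strip_list PySem.Chars.isspace s.toList

lemma pv_lines_stripped (s : String) : ∀ l ∈ pvLines s, PySem.Str.strip l = l := by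
  intro l hl
  unfold pvLines at hl
  obtain ⟨hl', -⟩ := List.mem_filter.mp hl
  obtain ⟨t, -, rfl⟩ := List.mem_map.mp hl'
  exact pv_strip_idem t

lemma pv_str_assoc (a b c : String) : a ++ b ++ c = a ++ (b ++ c) := by
  apply String.ext; simp

lemma pv_str_append_empty (a : String) : a ++ "" = a := by
  apply String.ext; simp

lemma pv_join_empty_nil : PySem.Str.join "" [] = "" := by
  apply String.ext; simp [PySem.Str.toList_join, PySem.Chars.join_nil]

lemma pv_join_empty_cons (p : String) (ps : List String) :
    PySem.Str.join "" (p :: ps) = p ++ PySem.Str.join "" ps := by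
  apply String.ext
  cases ps with
  | nil => simp [PySem.Str.toList_join, PySem.Chars.join_singleton, PySem.Chars.join_nil]
  | cons q qs => simp [PySem.Str.toList_join, PySem.Chars.join_cons_cons]

lemma pv_join_empty_append (ps qs : List String) :
    PySem.Str.join "" (ps ++ qs) = PySem.Str.join "" ps ++ PySem.Str.join "" qs := by
  induction ps with
  | nil => rw [pv_join_empty_nil]; apply String.ext; simp
  | cons p ps ih => rw [List.cons_append, pv_join_empty_cons, pv_join_empty_cons, ih, pv_str_assoc]

-- ---- dictionary-membership bridge used by A's scan ----
lemma pv_keys_contains_get? (cm : PySem.Dict String String) (k : String) :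
    cm.keys.contains k = (cm.get? k).isSome := by
  cases hg : cm.get? k with
  | none =>
    have hnm := (PySem.Dict.get?_eq_none_iff_not_mem_keys cm k).mp hg
    simp [hnm]
  | some v =>
    have : cm.contains k = true := by
      rw [PySem.Dict.contains_eq_isSome_get?, hg]; rfl
    have hm := (PySem.Dict.contains_iff_mem_keys cm k).mp this
    simp [hm]

-- ---- scan phase: A's header scan produces exactly the ghost header list ----
lemma pv_scanStep_eq (cm : PySem.Dict String String)
    (st : List Int × List String × PySem.Dict String (List String)) (i : Int) (line : String)
    (hl : PySem.Str.strip line = line) :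
    pvA_scanStep cm st (i, line) =
      match pvHeader cm line with
      | none => st
      | some (n, none) => (st.1 ++ [i], st.2.1 ++ [n], st.2.2)
      | some (n, some v) => (st.1 ++ [i], st.2.1 ++ [n], st.2.2.insert n [v]) := by
  simp only [pvA_scanStep, pvHeader, hl, pv_keys_contains_get?]
  by_cases hc : PySem.Str.isIn ":" line
  · simp only [hc, if_true, if_pos]
    cases hg : cm.get? (PySem.Str.lower (PySem.Str.strip
        (((PySem.Str.splitMax? line ":" 1).getD []).getD 0 ""))) with
    | none => simp [hg]
    | some name =>
      simp [hg]
      split <;> rename_i hveq <;> simp [hveq]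
  · simp only [hc, if_false, Bool.false_eq_true]
    cases hg : cm.get? (pvRstripCD (PySem.Str.lower line)) with
    | none => simp [hc, hg]
    | some name => simp [hc, hg]

lemma pv_scan_eq (cm : PySem.Dict String String) (L : List String)
    (hL : ∀ l ∈ L, PySem.Str.strip l = l) :
    ∀ (k : Nat) (is : List Int) (ns : List String) (pre : PySem.Dict String (List String)),
    (PySem.List.enumerate L (k : Int)).foldl (pvA_scanStep cm) (is, ns, pre) =
      (is ++ (pvHdrs cm L k).map (fun h => ((h.1 : Int))),
       ns ++ (pvHdrs cm L k).map (fun h => h.2.1),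
       (pvHdrs cm L k).foldl pvPreStep pre) := by
  induction L with
  | nil => intro k is ns pre; simp [PySem.List.enumerate_nil, pvHdrs]
  | cons l ls ih =>
    intro k is ns pre
    have hL' : ∀ a ∈ ls, PySem.Str.strip a = a := fun a ha => hL a (by simp [ha])
    rw [PySem.List.enumerate_cons, List.foldl_cons,
      pv_scanStep_eq cm _ _ l (hL l (by simp))]
    have hcast : ((k : Int) + 1) = (((k + 1 : Nat)) : Int) := by push_cast; ring
    cases hx : pvHeader cm l with
    | none =>
      simp only [pvHdrs, hx]
      rw [hcast, ih hL']
    | some nv =>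
      obtain ⟨n, ov⟩ := nv
      cases ov with
      | none =>
        simp only [pvHdrs, hx]
        rw [hcast, ih hL']
        simp [pvPreStep]
      | some v =>
        simp only [pvHdrs, hx]
        rw [hcast, ih hL']
        simp [pvPreStep]

lemma pv_scan_eq0 (cm : PySem.Dict String String) (L : List String)
    (hL : ∀ l ∈ L, PySem.Str.strip l = l) :
    (PySem.List.enumerate L).foldl (pvA_scanStep cm) ([], [], PySem.Dict.empty) =
      ((pvHdrs cm L 0).map (fun h => ((h.1 : Int))),
       (pvHdrs cm L 0).map (fun h => h.2.1),
       pvPre (pvHdrs cm L 0)) := by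
  have h := pv_scan_eq cm L hL 0 [] [] PySem.Dict.empty
  simpa [pvPre] using h

-- ---- pre_parsed_sections: lookups of the inline fold ----
lemma pv_pre_contains (hs : List (Nat × String × Option String))
    (d : PySem.Dict String (List String)) (c : String) :
    (hs.foldl pvPreStep d).contains c = (d.contains c || !(pvInl c hs).isEmpty) := by
  induction hs generalizing d with
  | nil => simp [pvInl]
  | cons h t ih =>
    rw [List.foldl_cons, ih]
    cases hv : h.2.2 with
    | none => simp [pvPreStep, hv, pvInl, List.filterMap_cons, ite_self]
    | some v =>
      by_cases hbc : h.2.1 = c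
      · simp [pvPreStep, hv, pvInl, List.filterMap_cons, hbc, PySem.Dict.contains_insert]
      · have hcb : (c == h.2.1) = false := by simp [Ne.symm hbc]
        simp [pvPreStep, hv, pvInl, hbc, PySem.Dict.contains_insert, hcb]

lemma pv_pre_contains_of_isSome (hs : List (Nat × String × Option String))
    (h : Nat × String × Option String) (hmem : h ∈ hs) (hv : h.2.2.isSome) :
    (pvPre hs).contains h.2.1 = true := by
  unfold pvPre
  rw [pv_pre_contains]
  obtain ⟨v, hv'⟩ := Option.isSome_iff_exists.mp hv
  have hmemv : v ∈ pvInl h.2.1 hs := by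
    unfold pvInl
    exact List.mem_filterMap.mpr ⟨h, hmem, by simp [hv']⟩
  have hne : pvInl h.2.1 hs ≠ [] := List.ne_nil_of_mem hmemv
  simp [hne]

-- ---- ghost header list facts ----
lemma pv_hdrs_bounds (cm : PySem.Dict String String) (L : List String) :
    ∀ (k : Nat), ∀ h ∈ pvHdrs cm L k, k ≤ h.1 ∧ h.1 < k + L.length := by
  induction L with
  | nil => intro k h hh; simp [pvHdrs] at hh
  | cons a ls ih =>
    intro k h hh
    cases hx : pvHeader cm a <;> rw [pvHdrs] at hh <;> rw [hx] at hh
    · have := ih (k + 1) h hh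
      simp only [List.length_cons]
      omega
    · rcases List.mem_cons.mp hh with rfl | hh'
      · simp only [List.length_cons]; omega
      · have := ih (k + 1) h hh'
        simp only [List.length_cons]
        omega

lemma pv_hdrs_snoc (cm : PySem.Dict String String) (l : List String) (x : String) :
    ∀ (k : Nat),
    pvHdrs cm (l ++ [x]) k =
      pvHdrs cm l k ++ (match pvHeader cm x with
        | some h => [(k + l.length, h)]
        | none => []) := by
  induction l with
  | nil =>
    intro k
    cases hx : pvHeader cm x <;> simp [pvHdrs, hx]
  | cons a t ih =>
    intro k
    rw [List.cons_append]
    cases ha : pvHeader cm a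
    · rw [pvHdrs, ha, pvHdrs, ha, ih (k + 1)]
      have h3 : k + 1 + t.length = k + (a :: t).length := by simp; omega
      rw [h3]
    · rw [pvHdrs, ha, pvHdrs, ha, ih (k + 1)]
      have h3 : k + 1 + t.length = k + (a :: t).length := by simp; omega
      rw [h3, List.cons_append]

lemma pv_fills_names (L : List String) (hs : List (Nat × String × Option String)) :
    (pvFills L hs).map (fun p => p.1) = hs.map (fun h => h.2.1) := by
  induction hs with
  | nil => rfl
  | cons h t ih => simp [pvFills, ih]

lemma pv_fills_length (L : List String) (hs : List (Nat × String × Option String)) :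
    (pvFills L hs).length = hs.length := by
  induction hs with
  | nil => rfl
  | cons h t ih => simp [pvFills, ih]

lemma pv_fills_getElem? (L : List String) (hs : List (Nat × String × Option String)) (j : Nat) :
    (pvFills L hs)[j]? =
      (hs[j]?).map (fun h =>
        (h.2.1, (L.drop (h.1 + 1)).take (pvNext L (hs.drop (j + 1)) - (h.1 + 1)))) := by
  induction hs generalizing j with
  | nil => simp [pvFills]
  | cons h t ih =>
    cases j with
    | zero => simp [pvFills]
    | succ j =>
      simp only [pvFills, List.getElem?_cons_succ, List.drop_succ_cons]
      exact ih j

lemma pv_fills_last (L : List String) (hs : List (Nat × String × Option String))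
    (h : Nat × String × Option String) (hlast : hs.getLast? = some h) :
    ∃ finit flast, pvFills L hs = finit ++ [flast] ∧ flast.1 = h.2.1 := by
  have hmap := congrArg List.getLast? (pv_fills_names L hs)
  rw [List.getLast?_map, List.getLast?_map, hlast] at hmap
  cases hgl : (pvFills L hs).getLast? with
  | none =>
    rw [hgl] at hmap
    simp at hmap
  | some fl =>
    obtain ⟨ys, hy⟩ := List.getLast?_eq_some_iff.mp hgl
    rw [hgl] at hmap
    simp at hmap
    exact ⟨ys, fl, hy, hmap⟩

-- ---- the fill loop over range() equals the fold over the ghost fill list ----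
lemma pv_fill_fold_eq (L : List String) (hs : List (Nat × String × Option String))
    (pre : PySem.Dict String (List String)) (hne : hs ≠ []) :
    (PySem.List.pyRange 0
        (PySem.List.len ((hs.map (fun h => ((h.1 : Int)))) ++ [PySem.List.len L]) - 1)).foldl
      (pvA_fillStep L (hs.map (fun h => h.2.1)) ((hs.map (fun h => ((h.1 : Int)))) ++ [PySem.List.len L]) pre) pre
    = (pvFills L hs).foldl (pvFillStep (fun c => pre.contains c)) pre := by
  have hk : PySem.List.len ((hs.map (fun h => ((h.1 : Int)))) ++ [PySem.List.len L]) - 1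
      = ((pvFills L hs).length : Int) := by
    simp [PySem.List.len, pv_fills_length]
  rw [hk, ← PySem.List.foldl_pyRange_zero_pyGetD' (pvFills L hs) ("", ([] : List String))
        (pvFillStep (fun c => pre.contains c)) pre]
  apply PySem.List.foldl_congr_mem
  intro acc j hj
  rw [PySem.List.mem_pyRange_one] at hj
  obtain ⟨hj0, hjlt⟩ := hj
  obtain ⟨n, rfl⟩ : ∃ n : Nat, j = (n : Int) := ⟨j.toNat, by omega⟩
  rw [pv_fills_length] at hjlt
  have hn : n < hs.length := by exact_mod_cast hjlt
  have hnames : PySem.List.pyGetD (hs.map (fun h => h.2.1)) (n : Int) "" = hs[n].2.1 := by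
    rw [PySem.List.pyGetD_natCast, List.getD_eq_getElem?_getD, List.getElem?_map,
      List.getElem?_eq_getElem hn]
    rfl
  have hidx : PySem.List.pyGetD ((hs.map (fun h => ((h.1 : Int)))) ++ [PySem.List.len L]) (n : Int) 0
      = ((hs[n].1 : Int)) := by
    rw [PySem.List.pyGetD_natCast, List.getD_eq_getElem?_getD,
      List.getElem?_append_left (by simp [hn]), List.getElem?_map, List.getElem?_eq_getElem hn]
    rfl
  have hfill : PySem.List.pyGetD (pvFills L hs) (n : Int) ("", ([] : List String))
      = (hs[n].2.1, (L.drop (hs[n].1 + 1)).take (pvNext L (hs.drop (n + 1)) - (hs[n].1 + 1))) := by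
    rw [PySem.List.pyGetD_natCast, List.getD_eq_getElem?_getD, pv_fills_getElem?,
      List.getElem?_eq_getElem hn]
    rfl
  have hnext : PySem.List.pyGetD ((hs.map (fun h => ((h.1 : Int)))) ++ [PySem.List.len L]) ((n : Int) + 1) 0
      = ((pvNext L (hs.drop (n + 1)) : Nat) : Int) := by
    have hj1ev : ((n : Int) + 1) = (((n + 1 : Nat)) : Int) := by push_cast; ring
    rw [hj1ev, PySem.List.pyGetD_natCast, List.getD_eq_getElem?_getD]
    by_cases hlt : n + 1 < hs.length
    · rw [List.getElem?_append_left (by simp [hlt]), List.getElem?_map,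
        List.getElem?_eq_getElem hlt]
      have hh : (hs.drop (n + 1)).head? = some hs[n + 1] := by
        rw [List.head?_drop, List.getElem?_eq_getElem hlt]
      simp [pvNext, hh]
    · have hdn : hs.drop (n + 1) = [] := List.drop_eq_nil_of_le (by omega)
      have hlen : n + 1 = (hs.map (fun h => ((h.1 : Int)))).length := by simp; omega
      rw [hlen, List.getElem?_concat_length]
      simp [pvNext, hdn, PySem.List.len]
  simp only [pvA_fillStep, pvFillStep, hnames, hidx, hnext, hfill]
  by_cases hpre : pre.contains hs[n].2.1
  · simp [hpre]
  · simp only [hpre, Bool.false_eq_true, if_false]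
    congr 1
    have hcast1 : ((hs[n].1 : Int) + 1) = (((hs[n].1 + 1 : Nat)) : Int) := by
      push_cast; ring
    rw [hcast1, PySem.List.slice_natCast]

lemma pv_fillfold_contains (q : String → Bool) (ps : List (String × List String))
    (m : PySem.Dict String (List String)) (c : String) :
    (ps.foldl (pvFillStep q) m).contains c
      = (m.contains c || (!q c && (ps.map (fun p => p.1)).contains c)) := by
  induction ps generalizing m with
  | nil => simp
  | cons p t ih =>
    rw [List.foldl_cons, ih]
    by_cases hq : q p.1
    · by_cases hpc : p.1 = c
      · rw [← hpc] at *
        simp [pvFillStep, hq, List.contains_cons]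
      · have hcb : (c == p.1) = false := by simp [Ne.symm hpc]
        simp [pvFillStep, hq, List.contains_cons, hcb]
    · by_cases hpc : p.1 = c
      · rw [← hpc] at *
        simp [pvFillStep, hq, List.contains_cons, PySem.Dict.contains_insert]
      · have hcb : (c == p.1) = false := by simp [Ne.symm hpc]
        simp [pvFillStep, hq, List.contains_cons, hcb, PySem.Dict.contains_insert]

lemma pv_fillfold_getD_skip (q : String → Bool) (ps : List (String × List String))
    (m : PySem.Dict String (List String)) (c : String) (hq : q c = true) :
    (ps.foldl (pvFillStep q) m).getD c [] = m.getD c [] := by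
  induction ps generalizing m with
  | nil => rfl
  | cons p t ih =>
    rw [List.foldl_cons, ih]
    unfold pvFillStep
    split
    · rfl
    · rename_i hqp
      rw [PySem.Dict.getD_insert, if_neg]
      intro e
      exact hqp (by rw [← e]; exact hq)

lemma pv_fillfold_getD (q : String → Bool) (ps : List (String × List String))
    (m : PySem.Dict String (List String)) (c : String) (hq : q c = false) :
    (ps.foldl (pvFillStep q) m).getD c [] =
      match (ps.filter (fun p => p.1 == c)).getLast? with
      | some p => p.2
      | none => m.getD c [] := by
  induction ps generalizing m with
  | nil => simp
  | cons p t ih =>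
    rw [List.foldl_cons, ih]
    by_cases hpc : p.1 = c
    · simp only [List.filter_cons, hpc, beq_self_eq_true, if_true]
      rw [List.getLast?_cons]
      cases hg : (List.filter (fun p => p.1 == c) t).getLast? with
      | some u => simp
      | none =>
        simp only [Option.getD_none]
        show (pvFillStep q m p).getD c [] = p.2
        unfold pvFillStep
        rw [hpc, if_neg (by simp [hq]), PySem.Dict.getD_insert, if_pos rfl]
    · have hpc' : (p.1 == c) = false := by simp [hpc]
      simp only [List.filter_cons, hpc', Bool.false_eq_true, if_false]
      cases hg : (List.filter (fun p => p.1 == c) t).getLast? with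
      | some u => rfl
      | none =>
        unfold pvFillStep
        by_cases hqp : q p.1 = true
        · rw [if_pos hqp]
        · rw [if_neg hqp, PySem.Dict.getD_insert, if_neg (Ne.symm hpc)]

-- ---- A's final content map, pointwise ----
lemma pv_A_map_eq (cm : PySem.Dict String String) (L : List String)
    (hL : ∀ l ∈ L, PySem.Str.strip l = l) :
    (∀ c, ((PySem.List.pyRange 0
        (PySem.List.len (if !((((PySem.List.enumerate L).foldl (pvA_scanStep cm) ([], [], PySem.Dict.empty)).1) == []) then ((PySem.List.enumerate L).foldl (pvA_scanStep cm) ([], [], PySem.Dict.empty)).1 ++ [PySem.List.len L] else ((PySem.List.enumerate L).foldl (pvA_scanStep cm) ([], [], PySem.Dict.empty)).1) - 1)).foldl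
        (pvA_fillStep L ((PySem.List.enumerate L).foldl (pvA_scanStep cm) ([], [], PySem.Dict.empty)).2.1
          (if !((((PySem.List.enumerate L).foldl (pvA_scanStep cm) ([], [], PySem.Dict.empty)).1) == []) then ((PySem.List.enumerate L).foldl (pvA_scanStep cm) ([], [], PySem.Dict.empty)).1 ++ [PySem.List.len L] else ((PySem.List.enumerate L).foldl (pvA_scanStep cm) ([], [], PySem.Dict.empty)).1)
          ((PySem.List.enumerate L).foldl (pvA_scanStep cm) ([], [], PySem.Dict.empty)).2.2)
        ((PySem.List.enumerate L).foldl (pvA_scanStep cm) ([], [], PySem.Dict.empty)).2.2).contains c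
        = pvAContains (pvPre (pvHdrs cm L 0)) ((pvHdrs cm L 0).map (fun h => h.2.1)) c)
    ∧ (∀ c, ((PySem.List.pyRange 0
        (PySem.List.len (if !((((PySem.List.enumerate L).foldl (pvA_scanStep cm) ([], [], PySem.Dict.empty)).1) == []) then ((PySem.List.enumerate L).foldl (pvA_scanStep cm) ([], [], PySem.Dict.empty)).1 ++ [PySem.List.len L] else ((PySem.List.enumerate L).foldl (pvA_scanStep cm) ([], [], PySem.Dict.empty)).1) - 1)).foldl
        (pvA_fillStep L ((PySem.List.enumerate L).foldl (pvA_scanStep cm) ([], [], PySem.Dict.empty)).2.1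
          (if !((((PySem.List.enumerate L).foldl (pvA_scanStep cm) ([], [], PySem.Dict.empty)).1) == []) then ((PySem.List.enumerate L).foldl (pvA_scanStep cm) ([], [], PySem.Dict.empty)).1 ++ [PySem.List.len L] else ((PySem.List.enumerate L).foldl (pvA_scanStep cm) ([], [], PySem.Dict.empty)).1)
          ((PySem.List.enumerate L).foldl (pvA_scanStep cm) ([], [], PySem.Dict.empty)).2.2)
        ((PySem.List.enumerate L).foldl (pvA_scanStep cm) ([], [], PySem.Dict.empty)).2.2).getD c []
        = pvAGetD (pvPre (pvHdrs cm L 0)) (pvFills L (pvHdrs cm L 0)) c) := by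
  rw [pv_scan_eq0 cm L hL]
  rcases eq_or_ne (pvHdrs cm L 0) [] with hhs | hhs
  · constructor <;> intro c
    · simp [hhs, pvPre, pvAContains, PySem.List.pyRange_one_eq_nil (by norm_num : (-1:Int) ≤ 0),
        PySem.List.len]
    · simp [hhs, pvPre, pvAGetD, pvFills, PySem.List.pyRange_one_eq_nil (by norm_num : (-1:Int) ≤ 0),
        PySem.List.len]
  · have hmapne : (pvHdrs cm L 0).map (fun h => ((h.1 : Int))) ≠ [] := by simpa using hhs
    simp only [hmapne, beq_iff_eq, if_neg, Bool.not_eq_true', decide_eq_false hmapne]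
    have hbf : (((pvHdrs cm L 0).map (fun h => ((h.1 : Int)))) == ([] : List Int)) = false := by
      simp [hhs]
    rw [if_pos hbf]
    rw [pv_fill_fold_eq L (pvHdrs cm L 0) (pvPre (pvHdrs cm L 0)) hhs]
    constructor <;> intro c
    · rw [pv_fillfold_contains, pv_fills_names]
      unfold pvAContains
      cases hpc : (pvPre (pvHdrs cm L 0)).contains c <;> simp [hpc]
    · by_cases hpc : (pvPre (pvHdrs cm L 0)).contains c = true
      · rw [pv_fillfold_getD_skip _ _ _ _ hpc]
        unfold pvAGetD
        rw [if_pos hpc]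
      · have hpc' : (pvPre (pvHdrs cm L 0)).contains c = false := by
          cases h' : (pvPre (pvHdrs cm L 0)).contains c
          · rfl
          · exact absurd h' hpc
        rw [pv_fillfold_getD _ _ _ _ hpc']
        unfold pvAGetD
        rw [if_neg (by simp [hpc'])]
        cases hg : ((pvFills L (pvHdrs cm L 0)).filter (fun p => p.1 == c)).getLast? with
        | some u => rfl
        | none => exact PySem.Dict.getD_of_not_contains _ _ hpc'

-- ---- fills under appending one more line ----
lemma pv_appendLast_cons_of_ne_nil (x : String) (a : String × List String)
    (l : List (String × List String)) (hl : l ≠ []) :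
    pvAppendLast x (a :: l) = a :: pvAppendLast x l := by
  cases l with
  | nil => exact absurd rfl hl
  | cons q rest => rfl

lemma pv_appendLast_concat (x : String) (init : List (String × List String)) (p : String × List String) :
    pvAppendLast x (init ++ [p]) = init ++ [(p.1, p.2 ++ [x])] := by
  induction init with
  | nil => rfl
  | cons a t ih =>
    rw [List.cons_append, pv_appendLast_cons_of_ne_nil x a _ (by simp), ih, List.cons_append]

lemma pv_fills_snoc_nonhdr (l : List String) (x : String)
    (hs : List (Nat × String × Option String)) (hb : ∀ h ∈ hs, h.1 < l.length) :
    pvFills (l ++ [x]) hs = pvAppendLast x (pvFills l hs) := by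
  induction hs with
  | nil => rfl
  | cons h t ih =>
    have hh : h.1 < l.length := hb h (by simp)
    have hd : (l ++ [x]).drop (h.1 + 1) = l.drop (h.1 + 1) ++ [x] :=
      List.drop_append_of_le_length (by omega)
    cases t with
    | nil =>
      show (h.2.1, ((l ++ [x]).drop (h.1 + 1)).take (pvNext (l ++ [x]) [] - (h.1 + 1))) :: pvFills (l ++ [x]) []
          = pvAppendLast x ((h.2.1, (l.drop (h.1 + 1)).take (pvNext l [] - (h.1 + 1))) :: pvFills l [])
      have h1 : pvNext (l ++ [x]) [] - (h.1 + 1) = (l.drop (h.1 + 1)).length + 1 := by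
        simp [pvNext, List.length_append, List.length_drop]
        omega
      have h2 : pvNext l [] - (h.1 + 1) = (l.drop (h.1 + 1)).length := by
        simp [pvNext, List.length_drop]
      rw [hd, h1, h2, List.take_length, List.take_of_length_le (by simp)]
      rfl
    | cons h' t' =>
      have hh' : h'.1 < l.length := hb h' (by simp)
      show (h.2.1, ((l ++ [x]).drop (h.1 + 1)).take (pvNext (l ++ [x]) (h' :: t') - (h.1 + 1))) :: pvFills (l ++ [x]) (h' :: t')
          = pvAppendLast x ((h.2.1, (l.drop (h.1 + 1)).take (pvNext l (h' :: t') - (h.1 + 1))) :: pvFills l (h' :: t'))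
      rw [pv_appendLast_cons_of_ne_nil x _ _ (by simp [pvFills])]
      rw [ih (fun a ha => hb a (by simp [ha]))]
      have hnx : pvNext (l ++ [x]) (h' :: t') = pvNext l (h' :: t') := rfl
      rw [hnx, hd, List.take_append_of_le_length (by simp [pvNext, List.length_drop]; omega)]

lemma pv_fills_snoc_hdr (l : List String) (x : String)
    (hs : List (Nat × String × Option String)) (e : Nat × String × Option String)
    (hb : ∀ h ∈ hs, h.1 < l.length) (he : e.1 = l.length) :
    pvFills (l ++ [x]) (hs ++ [e]) = pvFills l hs ++ [(e.2.1, [])] := by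
  induction hs with
  | nil =>
    show (e.2.1, ((l ++ [x]).drop (e.1 + 1)).take (pvNext (l ++ [x]) [] - (e.1 + 1))) :: pvFills (l ++ [x]) []
        = pvFills l [] ++ [(e.2.1, [])]
    have hd : (l ++ [x]).drop (e.1 + 1) = [] :=
      List.drop_eq_nil_of_le (by simp [he])
    simp [pvFills, hd]
  | cons h t ih =>
    have hh : h.1 < l.length := hb h (by simp)
    have hd : (l ++ [x]).drop (h.1 + 1) = l.drop (h.1 + 1) ++ [x] :=
      List.drop_append_of_le_length (by omega)
    rw [List.cons_append]
    show (h.2.1, ((l ++ [x]).drop (h.1 + 1)).take (pvNext (l ++ [x]) (t ++ [e]) - (h.1 + 1))) :: pvFills (l ++ [x]) (t ++ [e])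
        = ((h.2.1, (l.drop (h.1 + 1)).take (pvNext l t - (h.1 + 1))) :: pvFills l t) ++ [(e.2.1, [])]
    rw [ih (fun a ha => hb a (by simp [ha])), List.cons_append]
    have hnx : pvNext (l ++ [x]) (t ++ [e]) = pvNext l t := by
      cases t with
      | nil => simp [pvNext, he]
      | cons h' t' => rfl
    have hnb : pvNext l t ≤ l.length := by
      cases t with
      | nil => simp [pvNext]
      | cons h' t' => exact le_of_lt (hb h' (by simp))
    rw [hnx, hd, List.take_append_of_le_length (by simp [List.length_drop]; omega)]

-- ---- the lock set (PySem.Set) ----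
lemma pv_set_contains_add (s : PySem.Set String) (a c : String) :
    (PySem.Set.add s a).contains c = (c == a || s.contains c) := by
  unfold PySem.Set.add
  split
  · rename_i hmem
    by_cases hc : c = a
    · subst hc
      simp only [beq_self_eq_true, Bool.true_or]
      exact hmem
    · simp [hc]
  · show List.contains _ c = _
    rw [List.contains_append]
    by_cases hc : c = a <;> simp [hc, PySem.Set.contains, Bool.or_comm]

-- ---- B's streaming state, characterized by the same ghost data ----
lemma pvB_step_none (cm : PySem.Dict String String)
    (st : PySem.Dict String (List String) × PySem.Set String × Option String) (line : String)
    (h : pvHeader cm line = none) :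
    pvB_step cm st line =
      match st.2.2 with
      | some cur => (st.1.modify cur [] (fun l => l ++ [line]), st.2.1, st.2.2)
      | none => st := by
  unfold pvB_step
  rw [h]

lemma pvB_step_some_val (cm : PySem.Dict String String)
    (st : PySem.Dict String (List String) × PySem.Set String × Option String) (line : String)
    (n v : String) (h : pvHeader cm line = some (n, some v)) :
    pvB_step cm st line = (st.1.insert n [v], PySem.Set.add st.2.1 n, none) := by
  unfold pvB_step
  rw [h]

lemma pvB_step_some_plain (cm : PySem.Dict String String)
    (st : PySem.Dict String (List String) × PySem.Set String × Option String) (line : String)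
    (n : String) (h : pvHeader cm line = some (n, none)) :
    pvB_step cm st line =
      if st.2.1.contains n then (st.1, st.2.1, (none : Option String))
      else (st.1.insert n ([] : List String), st.2.1, some n) := by
  unfold pvB_step
  rw [h]

lemma pv_B_invariant (cm : PySem.Dict String String) (L : List String) :
    (∀ c, (L.foldl (pvB_step cm) (PySem.Dict.empty, PySem.Set.empty, none)).1.contains c
        = pvAContains (pvPre (pvHdrs cm L 0)) ((pvHdrs cm L 0).map (fun h => h.2.1)) c)
    ∧ (∀ c, (L.foldl (pvB_step cm) (PySem.Dict.empty, PySem.Set.empty, none)).1.getD c []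
        = pvAGetD (pvPre (pvHdrs cm L 0)) (pvFills L (pvHdrs cm L 0)) c)
    ∧ (∀ c, (L.foldl (pvB_step cm) (PySem.Dict.empty, PySem.Set.empty, none)).2.1.contains c
        = (pvPre (pvHdrs cm L 0)).contains c)
    ∧ (L.foldl (pvB_step cm) (PySem.Dict.empty, PySem.Set.empty, none)).2.2
        = (match (pvHdrs cm L 0).getLast? with
           | some h => if h.2.2.isSome || (pvPre (pvHdrs cm L 0)).contains h.2.1 then none
                       else some h.2.1
           | none => none) := by
  induction L using List.reverseRecOn with
  | nil =>
    refine ⟨fun c => ?_, fun c => ?_, fun c => ?_, ?_⟩ <;>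
      simp [pvHdrs, pvPre, pvAContains, pvAGetD, pvFills, PySem.Set.empty, PySem.Set.contains]
  | append_singleton l x ih =>
    obtain ⟨ihc, ihg, ihl, ihcur⟩ := ih
    have hb : ∀ h ∈ pvHdrs cm l 0, h.1 < l.length := fun h hh => by
      have := pv_hdrs_bounds cm l 0 h hh; omega
    rw [List.foldl_append, List.foldl_cons, List.foldl_nil]
    have hsnoc := pv_hdrs_snoc cm l x 0
    simp only [Nat.zero_add] at hsnoc
    cases hx : pvHeader cm x with
    | none =>
      rw [hx] at hsnoc
      simp only [List.append_nil] at hsnoc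
      rw [hsnoc, pvB_step_none cm _ x hx]
      cases hlast : (pvHdrs cm l 0).getLast? with
      | none =>
        have hhs : pvHdrs cm l 0 = [] := List.getLast?_eq_none_iff.mp hlast
        have hcur : (l.foldl (pvB_step cm) (PySem.Dict.empty, PySem.Set.empty, none)).2.2 = none := by
          rw [ihcur, hlast]
        simp only [hcur]
        refine ⟨ihc, fun c => ?_, ihl, trivial⟩
        rw [ihg c, hhs]
        simp [pvFills]
      | some h =>
        by_cases hcond : (h.2.2.isSome || (pvPre (pvHdrs cm l 0)).contains h.2.1) = true
        · have hcur : (l.foldl (pvB_step cm) (PySem.Dict.empty, PySem.Set.empty, none)).2.2 = none := by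
            rw [ihcur, hlast]
            simp [hcond]
          simp only [hcur]
          have hpc : (pvPre (pvHdrs cm l 0)).contains h.2.1 = true := by
            rcases (by simpa using hcond :
                h.2.2.isSome = true ∨ (pvPre (pvHdrs cm l 0)).contains h.2.1 = true) with hsome | hpre
            · exact pv_pre_contains_of_isSome _ _ (List.mem_of_getLast? hlast) hsome
            · exact hpre
          obtain ⟨finit, flast, hfd, hfn⟩ := pv_fills_last l (pvHdrs cm l 0) h hlast
          have hfe : ∀ c, pvAGetD (pvPre (pvHdrs cm l 0)) (pvFills (l ++ [x]) (pvHdrs cm l 0)) c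
                       = pvAGetD (pvPre (pvHdrs cm l 0)) (pvFills l (pvHdrs cm l 0)) c := by
            intro c
            rw [pv_fills_snoc_nonhdr l x _ hb, hfd, pv_appendLast_concat]
            unfold pvAGetD
            by_cases hpcc : (pvPre (pvHdrs cm l 0)).contains c = true
            · simp [hpcc]
            · have hcne : (flast.1 == c) = false := by
                simp only [beq_eq_false_iff_ne, ne_eq]
                intro e
                rw [hfn] at e
                rw [e] at hpc
                exact hpcc hpc
              rw [if_neg (by simp [hpcc]), if_neg (by simp [hpcc]),
                List.filter_append, List.filter_append]
              simp [hcne]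
          refine ⟨ihc, fun c => ?_, ihl, ?_⟩
          · rw [hfe c]
            exact ihg c
          · rw [if_pos hcond]
        · have hs2 : h.2.2.isSome = false := by
            cases hv : h.2.2.isSome
            · rfl
            · exact absurd (by rw [hv, Bool.true_or]) hcond
          have hpc : (pvPre (pvHdrs cm l 0)).contains h.2.1 = false := by
            cases hv : (pvPre (pvHdrs cm l 0)).contains h.2.1
            · rfl
            · exact absurd (by rw [hv, Bool.or_true]) hcond
          have hcur : (l.foldl (pvB_step cm) (PySem.Dict.empty, PySem.Set.empty, none)).2.2
              = some h.2.1 := by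
            rw [ihcur, hlast]
            simp [hs2, hpc]
          simp only [hcur]
          obtain ⟨finit, flast, hfd, hfn⟩ := pv_fills_last l (pvHdrs cm l 0) h hlast
          have hnamesmem : ((pvHdrs cm l 0).map (fun h => h.2.1)).contains h.2.1 = true := by
            rw [List.contains_iff_mem]
            exact List.mem_map.mpr ⟨h, List.mem_of_getLast? hlast, rfl⟩
          refine ⟨fun c => ?_, fun c => ?_, ihl, ?_⟩
          · rw [PySem.Dict.contains_modify, ihc c]
            unfold pvAContains
            by_cases hc : c = h.2.1
            · subst hc
              simp only [beq_self_eq_true, Bool.true_or, hnamesmem, Bool.or_true]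
            · have hcb : (c == h.2.1) = false := by simp [hc]
              rw [hcb, Bool.false_or]
          · rw [PySem.Dict.getD_modify, pv_fills_snoc_nonhdr l x _ hb, hfd, pv_appendLast_concat]
            by_cases hc : c = h.2.1
            · rw [hc, if_pos rfl, ihg h.2.1]
              unfold pvAGetD
              rw [if_neg (by simp [hpc]), if_neg (by simp [hpc]), hfd,
                List.filter_append, List.filter_append]
              have hft : (flast.1 == h.2.1) = true := by simp [hfn]
              simp only [List.filter_cons, hft, if_true, List.filter_nil, List.getLast?_concat]
            · rw [if_neg hc, ihg c]
              unfold pvAGetD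
              by_cases hpcc : (pvPre (pvHdrs cm l 0)).contains c = true
              · simp [hpcc]
              · have hcne : (flast.1 == c) = false := by
                  simp only [beq_eq_false_iff_ne, ne_eq]
                  intro e
                  exact hc (by rw [← e, hfn])
                rw [if_neg (by simp [hpcc]), if_neg (by simp [hpcc]), hfd,
                  List.filter_append, List.filter_append]
                simp [hcne]
          · rw [if_neg hcond]
    | some nv =>
      obtain ⟨n, ov⟩ := nv
      rw [hx] at hsnoc
      have hfs : pvFills (l ++ [x]) (pvHdrs cm (l ++ [x]) 0)
          = pvFills l (pvHdrs cm l 0) ++ [(n, [])] := by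
        rw [hsnoc]
        exact pv_fills_snoc_hdr l x _ (l.length, n, ov) hb rfl
      have hlast' : (pvHdrs cm (l ++ [x]) 0).getLast? = some (l.length, n, ov) := by
        rw [hsnoc]
        exact List.getLast?_concat
      have hnames' : (pvHdrs cm (l ++ [x]) 0).map (fun h => h.2.1)
          = (pvHdrs cm l 0).map (fun h => h.2.1) ++ [n] := by
        rw [hsnoc]
        simp
      have hpre' : pvPre (pvHdrs cm (l ++ [x]) 0)
          = pvPreStep (pvPre (pvHdrs cm l 0)) (l.length, n, ov) := by
        rw [hsnoc]
        unfold pvPre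
        rw [List.foldl_append, List.foldl_cons, List.foldl_nil]
      cases ov with
      | some v =>
        rw [pvB_step_some_val cm _ x n v hx]
        have hpree : pvPre (pvHdrs cm (l ++ [x]) 0) = (pvPre (pvHdrs cm l 0)).insert n [v] := by
          rw [hpre']; rfl
        refine ⟨fun c => ?_, fun c => ?_, fun c => ?_, ?_⟩
        · rw [PySem.Dict.contains_insert, ihc c, hnames', hpree]
          unfold pvAContains
          rw [PySem.Dict.contains_insert, List.contains_append]
          by_cases hc : c = n
          · subst hc; simp
          · simp [hc, Bool.or_assoc]
        · rw [PySem.Dict.getD_insert, hpree, hfs]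
          by_cases hc : c = n
          · subst hc
            rw [if_pos rfl]
            unfold pvAGetD
            rw [if_pos (by rw [PySem.Dict.contains_insert]; simp), PySem.Dict.getD_insert,
              if_pos rfl]
          · rw [if_neg hc, ihg c]
            unfold pvAGetD
            rw [PySem.Dict.contains_insert, PySem.Dict.getD_insert]
            have hcb : (c == n) = false := by simp [hc]
            rw [hcb, Bool.false_or, if_neg hc]
            by_cases hpcc : (pvPre (pvHdrs cm l 0)).contains c = true
            · simp [hpcc]
            · have hpcc' : (pvPre (pvHdrs cm l 0)).contains c = false := by
                cases h' : (pvPre (pvHdrs cm l 0)).contains c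
                · rfl
                · exact absurd h' hpcc
              have hnc : (n == c) = false := by
                simp only [beq_eq_false_iff_ne, ne_eq]
                exact fun e => hc e.symm
              rw [if_neg (by simp [hpcc']), if_neg (by simp [hpcc']), List.filter_append]
              simp [hnc]
        · rw [pv_set_contains_add, ihl c, hpree, PySem.Dict.contains_insert]
        · rw [hlast']
          simp
      | none =>
        rw [pvB_step_some_plain cm _ x n hx]
        have hpree : pvPre (pvHdrs cm (l ++ [x]) 0) = pvPre (pvHdrs cm l 0) := by
          rw [hpre']; rfl
        by_cases hlk : (l.foldl (pvB_step cm) (PySem.Dict.empty, PySem.Set.empty, none)).2.1.contains n = true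
        · have hpcn : (pvPre (pvHdrs cm l 0)).contains n = true := by rw [← ihl n]; exact hlk
          rw [if_pos hlk]
          refine ⟨fun c => ?_, fun c => ?_, fun c => ?_, ?_⟩
          · rw [ihc c, hnames', hpree]
            unfold pvAContains
            rw [List.contains_append]
            by_cases hc : c = n
            · subst hc
              simp [hpcn]
            · simp [hc]
          · rw [ihg c, hpree, hfs]
            unfold pvAGetD
            by_cases hpcc : (pvPre (pvHdrs cm l 0)).contains c = true
            · simp [hpcc]
            · have hpcc' : (pvPre (pvHdrs cm l 0)).contains c = false := by
                cases h' : (pvPre (pvHdrs cm l 0)).contains c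
                · rfl
                · exact absurd h' hpcc
              have hc : c ≠ n := fun e => hpcc (by rw [e]; exact hpcn)
              have hnc : (n == c) = false := by
                simp only [beq_eq_false_iff_ne, ne_eq]
                exact fun e => hc e.symm
              rw [if_neg (by simp [hpcc']), if_neg (by simp [hpcc']), List.filter_append]
              simp [hnc]
          · rw [ihl c, hpree]
          · rw [hlast', hpree]
            simp [hpcn]
        · have hlk' : (l.foldl (pvB_step cm) (PySem.Dict.empty, PySem.Set.empty, none)).2.1.contains n = false := by
            cases h' : (l.foldl (pvB_step cm) (PySem.Dict.empty, PySem.Set.empty, none)).2.1.contains n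
            · rfl
            · exact absurd h' hlk
          have hpcn : (pvPre (pvHdrs cm l 0)).contains n = false := by rw [← ihl n]; exact hlk'
          rw [if_neg (by rw [hlk']; simp)]
          refine ⟨fun c => ?_, fun c => ?_, fun c => ?_, ?_⟩
          · rw [PySem.Dict.contains_insert, ihc c, hnames', hpree]
            unfold pvAContains
            rw [List.contains_append]
            by_cases hc : c = n
            · subst hc
              simp
            · simp [hc]
          · rw [PySem.Dict.getD_insert, hpree, hfs]
            by_cases hc : c = n
            · subst hc
              rw [if_pos rfl]
              unfold pvAGetD
              rw [if_neg (by simp [hpcn]), List.filter_append]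
              simp
            · rw [if_neg hc, ihg c]
              unfold pvAGetD
              by_cases hpcc : (pvPre (pvHdrs cm l 0)).contains c = true
              · simp [hpcc]
              · have hpcc' : (pvPre (pvHdrs cm l 0)).contains c = false := by
                  cases h' : (pvPre (pvHdrs cm l 0)).contains c
                  · rfl
                  · exact absurd h' hpcc
                have hnc : (n == c) = false := by
                  simp only [beq_eq_false_iff_ne, ne_eq]
                  exact fun e => hc e.symm
                rw [if_neg (by simp [hpcc']), if_neg (by simp [hpcc']), List.filter_append]
                simp [hnc]
          · rw [ihl c, hpree]
          · rw [hlast', hpree]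
            simp [hpcn]

-- ---- HTML assembly ----
lemma pv_lineStepA_eq (h line : String) : pvA_lineStep h line = h ++ pvPiece line := by
  unfold pvA_lineStep pvPiece
  split <;> (apply String.ext; simp)

lemma pv_lineStepB_eq (ps : List String) (line : String) :
    pvB_lineStep ps line = ps ++ [pvPiece line] := by
  unfold pvB_lineStep pvPiece
  split <;> rfl

lemma pv_A_lineFold (ls : List String) (h : String) :
    ls.foldl pvA_lineStep h = h ++ PySem.Str.join "" (ls.map pvPiece) := by
  induction ls generalizing h with
  | nil => simp [pv_join_empty_nil, pv_str_append_empty]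
  | cons l ls ih =>
    rw [List.foldl_cons, ih, pv_lineStepA_eq, List.map_cons, pv_join_empty_cons, pv_str_assoc]

lemma pv_B_lineFold (ls : List String) (ps : List String) :
    ls.foldl pvB_lineStep ps = ps ++ ls.map pvPiece := by
  induction ls generalizing ps with
  | nil => simp
  | cons l ls ih => rw [List.foldl_cons, ih, pv_lineStepB_eq]; simp

lemma pv_A_htmlStep_eq (m : PySem.Dict String (List String)) (h sect : String) :
    pvA_htmlStep m h sect = h ++ PySem.Str.join "" (pvBlock m sect) := by
  unfold pvA_htmlStep pvBlock
  split
  · rw [pv_join_empty_nil, pv_str_append_empty]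
  · rw [pv_A_lineFold, pv_join_empty_cons]
    apply String.ext
    simp

lemma pv_B_partsStep_eq (m : PySem.Dict String (List String)) (ps : List String) (sect : String) :
    pvB_partsStep m ps sect = ps ++ pvBlock m sect := by
  unfold pvB_partsStep pvBlock
  split
  · simp
  · rw [pv_B_lineFold]
    simp

lemma pv_block_congr (mA mB : PySem.Dict String (List String))
    (hc : ∀ c, mA.contains c = mB.contains c) (hg : ∀ c, mA.getD c [] = mB.getD c [])
    (sect : String) : pvBlock mA sect = pvBlock mB sect := by
  unfold pvBlock
  rw [hc, hg]

lemma pv_html_eq (mA mB : PySem.Dict String (List String))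
    (hc : ∀ c, mA.contains c = mB.contains c) (hg : ∀ c, mA.getD c [] = mB.getD c [])
    (cats : List String) (h : String) (ps : List String) (hjoin : h = PySem.Str.join "" ps) :
    cats.foldl (pvA_htmlStep mA) h = PySem.Str.join "" (cats.foldl (pvB_partsStep mB) ps) := by
  induction cats generalizing h ps with
  | nil => simpa using hjoin
  | cons cat cats ih =>
    rw [List.foldl_cons, List.foldl_cons]
    apply ih
    rw [pv_A_htmlStep_eq, pv_B_partsStep_eq, pv_join_empty_append, hjoin,
      pv_block_congr mA mB hc hg]

-- ===== VERDICT (by name: the statement is the Claim_ definition above) =====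
theorem generate_html_string_updated_spec : Claim_equal_generate_html_string_updated := by
  intro chatgpt_output category_list _
  unfold Spec_generate_html_string_updated
  unfold generate_html_string_updated generate_html_string_updated_alt
  have hL := pv_lines_stripped chatgpt_output
  obtain ⟨hAc, hAg⟩ := pv_A_map_eq (pvCmap category_list) (pvLines chatgpt_output) hL
  obtain ⟨hBc, hBg, -, -⟩ := pv_B_invariant (pvCmap category_list) (pvLines chatgpt_output)
  have hc : ∀ c, _ := fun c => (hAc c).trans (hBc c).symm
  have hg : ∀ c, _ := fun c => (hAg c).trans (hBg c).symm
  refine Prod.ext ?_ ?_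
  · exact pv_html_eq _ _ hc hg category_list "" [] pv_join_empty_nil.symm
  · exact List.map_congr_left (fun sec _ => by rw [hg sec])
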